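-- pv_equiv track=rewrite | github.com/christopherwallis/AdventOfCode2021 | 2021-12-12/day12-p2.py | is_double_excluded
-- ===== SOURCE A (Python) =====
-- def is_double_excluded(room, excluded_list):
--     if room == "start":
--         return True
--     excluded_dict = {room: 0}
--     double = False
--     for item in excluded_list:
--         try:
--             excluded_dict[item] += 1
--         except KeyError:
--             excluded_dict[item] = 1
--         if excluded_dict[item] > 1:
--             double = True
--     if excluded_dict[room] > 0 and double:
--         return True
--     return False
-- ===== SOURCE B (Python) =====
-- def is_double_excluded(room, excluded_list):
--     if room == "start":
--         return True
--     items = list(excluded_list)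
--     seen = set(items)
--     return room in seen and len(seen) < len(items)
-- ===== Notes on version B (the rewrite author's own statement) =====
-- stated objective: simpler
-- what changed: Replaces the counting loop over a dict with a running double flag by a single set build: membership of room plus a set-cardinality vs list-length comparison detects the duplicate.
import Mathlib
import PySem

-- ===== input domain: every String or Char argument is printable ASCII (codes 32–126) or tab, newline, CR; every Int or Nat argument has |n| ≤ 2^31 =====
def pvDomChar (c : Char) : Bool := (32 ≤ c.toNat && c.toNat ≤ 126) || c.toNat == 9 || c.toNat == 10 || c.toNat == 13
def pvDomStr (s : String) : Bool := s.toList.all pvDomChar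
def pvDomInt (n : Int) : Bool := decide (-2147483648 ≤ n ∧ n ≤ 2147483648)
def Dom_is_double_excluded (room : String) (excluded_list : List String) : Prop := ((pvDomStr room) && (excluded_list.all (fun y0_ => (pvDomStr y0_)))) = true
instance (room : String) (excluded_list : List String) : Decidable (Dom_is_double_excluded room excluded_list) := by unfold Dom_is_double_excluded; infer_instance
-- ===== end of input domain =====

-- B replaces A's per-item counting dict and running double flag with one set build:
-- room-membership plus a set-cardinality vs list-length comparison (objective: simpler).

-- ===== PORT A =====
-- the try/except KeyError increment-or-initialise is exactly Dict.modify item 0 (· + 1)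
def is_double_excluded (room : String) (excluded_list : List String) : Bool :=
  if room == "start" then true
  else
    let st := excluded_list.foldl
      (fun (st : PySem.Dict String Int × Bool) item =>
        let d := st.1.modify item 0 (· + 1)
        let double := if d.getD item 0 > 1 then true else st.2
        (d, double))
      ((PySem.Dict.empty).insert room 0, false)
    if st.1.getD room 0 > 0 && st.2 then true else false

-- ===== PORT B =====
def is_double_excluded_alt (room : String) (excluded_list : List String) : Bool :=
  if room == "start" then true
  else
    let items := excluded_list
    let seen : PySem.Set String := PySem.Set.ofList items
    PySem.Set.contains seen room && decide (seen.length < items.length)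

-- ===== PRECONDITION & SPEC =====
def Spec_is_double_excluded (room : String) (excluded_list : List String) (out : Bool) : Prop := out = is_double_excluded_alt room excluded_list
instance (room : String) (excluded_list : List String) (out : Bool) : Decidable (Spec_is_double_excluded room excluded_list out) := by unfold Spec_is_double_excluded; infer_instance

-- ===== CLAIM (what is proved, stated in full; the proofs are below) =====
def Claim_equal_is_double_excluded : Prop := ∀ (room : String) (excluded_list : List String), Dom_is_double_excluded room excluded_list → Spec_is_double_excluded room excluded_list (is_double_excluded room excluded_list)

-- ===== LEMMAS AND PROOFS =====

-- A's loop: the dict counts occurrences, and the flag ends true iff some element was seen twice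
-- (given all stored counts are nonnegative).
theorem loopA_snd (l : List String) (d : PySem.Dict String Int) (b : Bool)
    (hpos : ∀ k, 0 ≤ d.getD k 0) :
    (l.foldl
      (fun (st : PySem.Dict String Int × Bool) item =>
        let d := st.1.modify item 0 (· + 1)
        let double := if d.getD item 0 > 1 then true else st.2
        (d, double))
      (d, b)).2
    = (b || decide (∃ x ∈ l, 1 ≤ d.getD x 0) || decide (¬ l.Nodup)) := by
  induction l generalizing d b with
  | nil => simp
  | cons a t ih =>
    have hpos' : ∀ k, 0 ≤ (d.modify a 0 (· + 1)).getD k 0 := by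
      intro k
      rw [PySem.Dict.getD_modify]
      split_ifs with h
      · have := hpos a; omega
      · exact hpos k
    simp only [List.foldl_cons]
    rw [ih _ _ hpos']
    rw [PySem.Dict.getD_modify_self]
    have hd : ∀ x, (1 ≤ (d.modify a 0 (· + 1)).getD x 0) ↔ (x = a ∨ 1 ≤ d.getD x 0) := by
      intro x
      rw [PySem.Dict.getD_modify]
      split_ifs with h
      · have := hpos a
        constructor
        · intro _; exact Or.inl h
        · intro _; omega
      · simp [h]
    have ha := hpos a
    by_cases h1 : 1 ≤ d.getD a 0
    · have : (if d.getD a 0 + 1 > 1 then true else b) = true := by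
        rw [if_pos (by omega)]
      rw [this]
      simp [hd, h1]
    · have : (if d.getD a 0 + 1 > 1 then true else b) = b := by
        rw [if_neg (by omega)]
      rw [this]
      simp only [List.nodup_cons, not_and_or, List.mem_cons]
      have hmem : (∃ x ∈ a :: t, 1 ≤ d.getD x 0) ↔ (∃ x ∈ t, 1 ≤ d.getD x 0) := by
        simp only [List.mem_cons]
        constructor
        · rintro ⟨x, (rfl | hx), hge⟩
          · exact absurd hge h1
          · exact ⟨x, hx, hge⟩
        · rintro ⟨x, hx, hge⟩; exact ⟨x, Or.inr hx, hge⟩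
      have hex : (∃ x ∈ t, x = a ∨ 1 ≤ d.getD x 0) ↔ (a ∈ t ∨ ∃ x ∈ t, 1 ≤ d.getD x 0) := by
        constructor
        · rintro ⟨x, hx, (rfl | hge)⟩
          · exact Or.inl hx
          · exact Or.inr ⟨x, hx, hge⟩
        · rintro (hx | ⟨x, hx, hge⟩)
          · exact ⟨a, hx, Or.inl rfl⟩
          · exact ⟨x, hx, Or.inr hge⟩
      simp only [hd, hmem, hex]
      by_cases hb : b <;> by_cases hat : a ∈ t <;>
        simp [hb, hat]

-- A's loop: the final dict holds count-in-l for every key (starting from counts in d).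
theorem loopA_fst (l : List String) (d : PySem.Dict String Int) (b : Bool) (v : String) :
    (l.foldl
      (fun (st : PySem.Dict String Int × Bool) item =>
        let d := st.1.modify item 0 (· + 1)
        let double := if d.getD item 0 > 1 then true else st.2
        (d, double))
      (d, b)).1.getD v 0 = d.getD v 0 + l.count v := by
  induction l generalizing d b with
  | nil => simp
  | cons a t ih =>
    simp only [List.foldl_cons]
    rw [ih, PySem.Dict.getD_modify, List.count_cons]
    by_cases hva : v = a
    · subst hva; simp; omega
    · have hbeq : (a == v) = false := by
        simp [beq_eq_false_iff_ne]; exact fun hh => hva hh.symm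
      simp [hva, hbeq]

-- set(xs) on append: absorb a repeated element, append a fresh one.
theorem ofList_append_singleton (xs : List String) (x : String) :
    PySem.Set.ofList (xs ++ [x])
      = if x ∈ PySem.Set.ofList xs then PySem.Set.ofList xs
        else PySem.Set.ofList xs ++ [x] := by
  rw [PySem.Set.ofList_eq_foldl, List.foldl_append, ← PySem.Set.ofList_eq_foldl]
  simp only [List.foldl_cons, List.foldl_nil, PySem.Set.add]
  split_ifs with h h2 h2
  · rfl
  · exact absurd (PySem.Set.contains_iff _ _ |>.mp h) h2
  · exact absurd (PySem.Set.contains_iff _ _ |>.mpr h2) (by simpa using h)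
  · rfl

-- the set is strictly smaller than the list exactly when the list has a duplicate
theorem ofList_length_lt_iff (xs : List String) :
    (PySem.Set.ofList xs).length < xs.length ↔ ¬ xs.Nodup := by
  induction xs using List.reverseRecOn with
  | nil => simp [PySem.Set.ofList]
  | append_singleton t x ih =>
    rw [ofList_append_singleton]
    have hle := PySem.Set.length_ofList_le (xs := t)
    have hperm : (t ++ [x]).Nodup ↔ (x :: t).Nodup := (List.perm_append_singleton x t).nodup_iff
    by_cases hmem : x ∈ PySem.Set.ofList t
    · rw [if_pos hmem]
      have hxt : x ∈ t := (PySem.Set.mem_ofList _ _).mp hmem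
      simp only [List.length_append, List.length_cons, List.length_nil, hperm, List.nodup_cons]
      simp [hxt]
      omega
    · rw [if_neg hmem]
      have hxt : x ∉ t := fun h => hmem ((PySem.Set.mem_ofList _ _).mpr h)
      simp only [List.length_append, List.length_cons, List.length_nil, hperm, List.nodup_cons,
        hxt, not_false_iff, true_and]
      constructor
      · intro h; exact ih.mp (by omega)
      · intro h; have := ih.mpr h; omega

theorem is_double_excluded_eq (room : String) (excluded_list : List String) :
    is_double_excluded room excluded_list = is_double_excluded_alt room excluded_list := by
  unfold is_double_excluded is_double_excluded_alt
  by_cases hs : room == "start"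
  · simp [hs]
  · simp only [hs, Bool.if_false_right]
    have hpos : ∀ k, 0 ≤ ((PySem.Dict.empty : PySem.Dict String Int).insert room 0).getD k 0 := by
      intro k
      rw [PySem.Dict.getD_insert]
      split_ifs <;> simp [PySem.Dict.getD, PySem.Dict.get?, PySem.Dict.empty]
    rw [loopA_snd _ _ _ hpos, loopA_fst]
    have hzero : ∀ k, ((PySem.Dict.empty : PySem.Dict String Int).insert room 0).getD k 0 = 0 := by
      intro k
      rw [PySem.Dict.getD_insert]
      split_ifs <;> simp [PySem.Dict.getD, PySem.Dict.get?, PySem.Dict.empty]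
    have hnoex : ¬ (∃ x ∈ excluded_list, 1 ≤ ((PySem.Dict.empty : PySem.Dict String Int).insert room 0).getD x 0) := by
      rintro ⟨x, _, hge⟩; rw [hzero x] at hge; omega
    rw [hzero room]
    have hcontains : PySem.Set.contains (PySem.Set.ofList excluded_list) room = decide (room ∈ excluded_list) := by
      by_cases h : room ∈ excluded_list
      · simp only [h, decide_true]
        exact (PySem.Set.contains_iff _ _).mpr ((PySem.Set.mem_ofList _ _).mpr h)
      · have h2 : PySem.Set.contains (PySem.Set.ofList excluded_list) room ≠ true :=
          fun hh => h ((PySem.Set.mem_ofList _ _).mp ((PySem.Set.contains_iff _ _).mp hh))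
        rw [decide_eq_false h]
        exact Bool.eq_false_iff.mpr h2
    rw [hcontains]
    have hcnt : (0 < excluded_list.count room) ↔ room ∈ excluded_list := List.count_pos_iff
    have hlt := ofList_length_lt_iff excluded_list
    simp only [hnoex, decide_false, Bool.false_or, Bool.or_false]
    by_cases hmem : room ∈ excluded_list <;> by_cases hnd : excluded_list.Nodup <;>
      simp_all

-- ===== VERDICT (by name: the statement is the Claim_ definition above) =====
theorem is_double_excluded_spec : Claim_equal_is_double_excluded := by
  intro room excluded_list _
  exact is_double_excluded_eq room excluded_list
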